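-- pv_equiv track=rewrite | github.com/Hadipiano94/Musician_Assistant | main.py | note_name_corrector
-- ===== SOURCE A (Python) =====
-- notes_list = ["c", "c#", "d", "d#", "e", "f", "f#", "g", "g#", "a", "a#", "b"]
--
-- alt_names_dict = {
--     "c": "do",
--     "c#": "do#",
--     "d": "re",
--     "d#": "re#",
--     "e": "mi",
--     "f": "fa",
--     "f#": "fa#",
--     "g": "sol",
--     "g#": "sol#",
--     "a": "la",
--     "a#": "la#",
--     "b": "si",
-- }
--
-- def note_name_corrector(note_name):
--     note_name = note_name.lower()
--     note_name = note_name.replace(" ", "")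
--     note_name = note_name.replace("sharp", "#")
--     note_name = note_name.replace("flat", "b")
--     if note_name not in notes_list:
--         if note_name in [alt_names_dict[i] for i in notes_list]:
--             return [i for i in alt_names_dict if alt_names_dict[i] == note_name][0]
--         elif note_name in ["eb", "mib"]:
--             return "d#"
--         elif note_name in ["gb", "solb"]:
--             return "f#"
--         elif note_name in ["ab", "lab"]:
--             return "g#"
--         elif note_name in ["bb", "sib"]:
--             return "a#"
--     else:
--         return note_name
-- ===== SOURCE B (Python) =====
-- _NOTE_TABLE = {
--     # the 12 canonical note names map to themselves
--     "c": "c", "c#": "c#", "d": "d", "d#": "d#", "e": "e", "f": "f",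
--     "f#": "f#", "g": "g", "g#": "g#", "a": "a", "a#": "a#", "b": "b",
--     # solfege names map back to the note name
--     "do": "c", "do#": "c#", "re": "d", "re#": "d#", "mi": "e", "fa": "f",
--     "fa#": "f#", "sol": "g", "sol#": "g#", "la": "a", "la#": "a#", "si": "b",
--     # flat spellings map to the enharmonic sharp
--     "eb": "d#", "mib": "d#", "gb": "f#", "solb": "f#",
--     "ab": "g#", "lab": "g#", "bb": "a#", "sib": "a#",
-- }
--
-- def _normalize(s):
--     return s.lower().replace(" ", "").replace("sharp", "#").replace("flat", "b")
--
-- def note_name_corrector(note_name):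
--     return _NOTE_TABLE.get(_normalize(note_name))
-- ===== Notes on version B (the rewrite author's own statement) =====
-- stated objective: simpler
-- what changed: Replaces A's branch cascade with its reverse-lookup list comprehensions over alt_names_dict by one precomputed flat dict mapping every recognized spelling to its canonical note, so the whole function is a single .get after the shared normalization.
import Mathlib
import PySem

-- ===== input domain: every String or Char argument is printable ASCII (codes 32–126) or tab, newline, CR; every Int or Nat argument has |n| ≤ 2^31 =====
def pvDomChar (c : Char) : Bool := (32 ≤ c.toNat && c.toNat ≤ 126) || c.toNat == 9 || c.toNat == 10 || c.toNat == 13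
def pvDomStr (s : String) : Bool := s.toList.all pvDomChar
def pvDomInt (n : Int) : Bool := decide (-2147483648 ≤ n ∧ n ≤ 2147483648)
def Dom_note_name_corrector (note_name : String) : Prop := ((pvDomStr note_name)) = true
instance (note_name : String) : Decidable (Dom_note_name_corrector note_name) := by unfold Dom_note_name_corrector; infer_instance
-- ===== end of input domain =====

-- B replaces A's branch cascade and reverse-lookup comprehensions with one precomputed flat table lookup (objective: simpler).
-- ===== PORT A =====
def pvNotesList : List String := ["c", "c#", "d", "d#", "e", "f", "f#", "g", "g#", "a", "a#", "b"]

def pvAltNamesDict : PySem.Dict String String :=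
  PySem.Dict.ofList [("c","do"), ("c#","do#"), ("d","re"), ("d#","re#"), ("e","mi"), ("f","fa"), ("f#","fa#"), ("g","sol"), ("g#","sol#"), ("a","la"), ("a#","la#"), ("b","si")]

-- dict[i] would raise KeyError only for keys absent from the dict; here i ranges over the
-- dict's own keys (pvNotesList), so getD with a dummy default is exact.
-- The Python '[...][0]' is reached only under the membership guard, where the filtered list
-- is nonempty, so head? (some of the first element) is exact there.
def note_name_corrector (note_name : String) : Option String :=
  let n1 := PySem.Str.lower note_name
  let n2 := PySem.Str.replace n1 " " ""
  let n3 := PySem.Str.replace n2 "sharp" "#"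
  let t := PySem.Str.replace n3 "flat" "b"
  if ¬ (pvNotesList.contains t) then
    if (pvNotesList.map (fun i => pvAltNamesDict.getD i "")).contains t then
      (pvAltNamesDict.keys.filter (fun i => pvAltNamesDict.getD i "" == t)).head?
    else if ["eb", "mib"].contains t then some "d#"
    else if ["gb", "solb"].contains t then some "f#"
    else if ["ab", "lab"].contains t then some "g#"
    else if ["bb", "sib"].contains t then some "a#"
    else none
  else some t

-- ===== PORT B =====
def pvNoteTable : PySem.Dict String String :=
  PySem.Dict.ofList [("c","c"), ("c#","c#"), ("d","d"), ("d#","d#"), ("e","e"), ("f","f"), ("f#","f#"), ("g","g"), ("g#","g#"), ("a","a"), ("a#","a#"), ("b","b"), ("do","c"), ("do#","c#"), ("re","d"), ("re#","d#"), ("mi","e"), ("fa","f"), ("fa#","f#"), ("sol","g"), ("sol#","g#"), ("la","a"), ("la#","a#"), ("si","b"), ("eb","d#"), ("mib","d#"), ("gb","f#"), ("solb","f#"), ("ab","g#"), ("lab","g#"), ("bb","a#"), ("sib","a#")]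

def pvNormalize (s : String) : String :=
  PySem.Str.replace (PySem.Str.replace (PySem.Str.replace (PySem.Str.lower s) " " "") "sharp" "#") "flat" "b"

def note_name_corrector_alt (note_name : String) : Option String :=
  pvNoteTable.get? (pvNormalize note_name)

-- ===== PRECONDITION & SPEC =====
def Spec_note_name_corrector (note_name : String) (out : Option String) : Prop := out = note_name_corrector_alt note_name
instance (note_name : String) (out : Option String) : Decidable (Spec_note_name_corrector note_name out) := by unfold Spec_note_name_corrector; infer_instance

-- ===== CLAIM (what is proved, stated in full; the proofs are below) =====
def Claim_equal_note_name_corrector : Prop := ∀ (note_name : String), Dom_note_name_corrector note_name → Spec_note_name_corrector note_name (note_name_corrector note_name)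

-- ===== LEMMAS AND PROOFS =====

-- A's post-normalization cascade agrees with B's flat table on EVERY string t.
theorem pvCore (t : String) :
    (if ¬ (pvNotesList.contains t) then
      if (pvNotesList.map (fun i => pvAltNamesDict.getD i "")).contains t then
        (pvAltNamesDict.keys.filter (fun i => pvAltNamesDict.getD i "" == t)).head?
      else if ["eb", "mib"].contains t then some "d#"
      else if ["gb", "solb"].contains t then some "f#"
      else if ["ab", "lab"].contains t then some "g#"
      else if ["bb", "sib"].contains t then some "a#"
      else none
    else some t) = pvNoteTable.get? t := by
  by_cases h0 : t = "c"
  · subst h0; decide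
  by_cases h1 : t = "c#"
  · subst h1; decide
  by_cases h2 : t = "d"
  · subst h2; decide
  by_cases h3 : t = "d#"
  · subst h3; decide
  by_cases h4 : t = "e"
  · subst h4; decide
  by_cases h5 : t = "f"
  · subst h5; decide
  by_cases h6 : t = "f#"
  · subst h6; decide
  by_cases h7 : t = "g"
  · subst h7; decide
  by_cases h8 : t = "g#"
  · subst h8; decide
  by_cases h9 : t = "a"
  · subst h9; decide
  by_cases h10 : t = "a#"
  · subst h10; decide
  by_cases h11 : t = "b"
  · subst h11; decide
  by_cases h12 : t = "do"
  · subst h12; decide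
  by_cases h13 : t = "do#"
  · subst h13; decide
  by_cases h14 : t = "re"
  · subst h14; decide
  by_cases h15 : t = "re#"
  · subst h15; decide
  by_cases h16 : t = "mi"
  · subst h16; decide
  by_cases h17 : t = "fa"
  · subst h17; decide
  by_cases h18 : t = "fa#"
  · subst h18; decide
  by_cases h19 : t = "sol"
  · subst h19; decide
  by_cases h20 : t = "sol#"
  · subst h20; decide
  by_cases h21 : t = "la"
  · subst h21; decide
  by_cases h22 : t = "la#"
  · subst h22; decide
  by_cases h23 : t = "si"
  · subst h23; decide
  by_cases h24 : t = "eb"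
  · subst h24; decide
  by_cases h25 : t = "mib"
  · subst h25; decide
  by_cases h26 : t = "gb"
  · subst h26; decide
  by_cases h27 : t = "solb"
  · subst h27; decide
  by_cases h28 : t = "ab"
  · subst h28; decide
  by_cases h29 : t = "lab"
  · subst h29; decide
  by_cases h30 : t = "bb"
  · subst h30; decide
  by_cases h31 : t = "sib"
  · subst h31; decide
  simp [pvNotesList, pvAltNamesDict, pvNoteTable, PySem.Dict.ofList, PySem.Dict.update,
        PySem.Dict.empty, PySem.Dict.insert, PySem.Dict.getD, PySem.Dict.get?,
        PySem.Dict.contains, h0, h1, h2, h3, h4, h5, h6, h7, h8, h9, h10, h11, h12, h13, h14, h15, h16, h17, h18, h19, h20, h21, h22, h23, h24, h25, h26, h27, h28, h29, h30, h31,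
        (Ne.symm h0), (Ne.symm h1), (Ne.symm h2), (Ne.symm h3), (Ne.symm h4), (Ne.symm h5), (Ne.symm h6), (Ne.symm h7), (Ne.symm h8), (Ne.symm h9), (Ne.symm h10), (Ne.symm h11), (Ne.symm h12), (Ne.symm h13), (Ne.symm h14), (Ne.symm h15), (Ne.symm h16), (Ne.symm h17), (Ne.symm h18), (Ne.symm h19), (Ne.symm h20), (Ne.symm h21), (Ne.symm h22), (Ne.symm h23), (Ne.symm h24), (Ne.symm h25), (Ne.symm h26), (Ne.symm h27), (Ne.symm h28), (Ne.symm h29), (Ne.symm h30), (Ne.symm h31)]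

-- ===== VERDICT (by name: the statement is the Claim_ definition above) =====
theorem note_name_corrector_spec : Claim_equal_note_name_corrector := by
  intro s _
  unfold Spec_note_name_corrector note_name_corrector note_name_corrector_alt pvNormalize
  exact pvCore _
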